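-- pv_equiv track=rewrite | github.com/vivekchand/clawmetry | clawmetry-landing/app.py | _normalize_subject
-- ===== SOURCE A (Python) =====
-- def _normalize_subject(s):
--     """Strip Re:/Fwd: prefixes for thread matching."""
--     s = (s or "").strip()
--     while True:
--         lower = s.lower()
--         if lower.startswith("re:") or lower.startswith("fw:"):
--             s = s[3:].strip()
--         elif lower.startswith("fwd:"):
--             s = s[4:].strip()
--         else:
--             break
--     return s
-- ===== SOURCE B (Python) =====
-- import re
--
-- _PREFIX_RE = re.compile(r'^(?:\s*(?:re|fw|fwd):)+\s*', re.IGNORECASE)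
--
--
-- def _normalize_subject(s):
--     """Strip Re:/Fwd: prefixes for thread matching."""
--     return _PREFIX_RE.sub("", (s or "").strip())
-- ===== Notes on version B (the rewrite author's own statement) =====
-- stated objective: idiomatic
-- what changed: A's while-loop of repeated lowercase/startswith tests, slicing and re-stripping is replaced by one anchored case-insensitive regex substitution that deletes the whole leading (\s*(re|fw|fwd):)+\s* prefix from the stripped string in a single left-to-right scan.
import Mathlib
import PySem

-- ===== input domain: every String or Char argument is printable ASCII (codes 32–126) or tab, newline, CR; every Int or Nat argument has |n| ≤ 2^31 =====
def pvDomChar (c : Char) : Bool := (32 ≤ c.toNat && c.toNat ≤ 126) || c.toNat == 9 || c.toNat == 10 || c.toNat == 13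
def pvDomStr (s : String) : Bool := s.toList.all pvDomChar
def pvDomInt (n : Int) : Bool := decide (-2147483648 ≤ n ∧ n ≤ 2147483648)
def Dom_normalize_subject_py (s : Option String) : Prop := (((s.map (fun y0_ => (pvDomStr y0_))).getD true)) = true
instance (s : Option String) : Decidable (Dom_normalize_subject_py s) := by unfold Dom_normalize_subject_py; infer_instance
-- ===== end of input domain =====

-- B replaces A's slice-and-re-strip while-loop by a single regex substitution
-- (one left-to-right scan peeling '(?:\s*(?:re|fw|fwd):)+\s*'); objective: idiomatic.

-- ===== PORT A =====

-- helpers for the termination of peelA: the loop body shortens the string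
theorem pv_slice_drop (cs : List Char) (k : Nat) (h : k ≤ cs.length) :
    PySem.List.slice cs (some (k : Int)) none = cs.drop k := by
  have h0 : ¬((k : Int) < 0) := by omega
  simp only [PySem.List.slice, PySem.List.clampIdx, h0, if_false, Int.toNat_natCast,
    min_eq_left h]
  exact List.take_of_length_le (by simp)

theorem pv_strip_len_le (l : List Char) : (PySem.Chars.strip l).length ≤ l.length := by
  simp only [PySem.Chars.strip, PySem.Chars.lstrip, PySem.Chars.rstrip, List.length_reverse]
  calc (List.dropWhile PySem.Chars.isspace (List.dropWhile PySem.Chars.isspace l).reverse).length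
      ≤ (List.dropWhile PySem.Chars.isspace l).reverse.length := List.length_dropWhile_le _ _
    _ ≤ l.length := by simpa using List.length_dropWhile_le PySem.Chars.isspace l

theorem pv_strip_slice_lt (cs : List Char) (k : Nat) (hk : 0 < k) (h : k ≤ cs.length) :
    (PySem.Chars.strip (PySem.List.slice cs (some (k : Int)) none)).length < cs.length := by
  rw [pv_slice_drop cs k h]
  have h1 := pv_strip_len_le (cs.drop k)
  have h2 : (cs.drop k).length = cs.length - k := List.length_drop
  omega

theorem pv_startswith_len {cs p : List Char}
    (h : PySem.Chars.startswith (PySem.Chars.lower cs) p = true) : p.length ≤ cs.length := by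
  rw [PySem.Chars.startswith_iff] at h
  have := h.length_le
  simpa [PySem.Chars.lower] using this

-- the while-loop of A: lower the string, peel 're:'/'fw:' (3 chars) or 'fwd:' (4 chars), re-strip
def peelA (cs : List Char) : List Char :=
  let lw := PySem.Chars.lower cs
  if PySem.Chars.startswith lw ['r','e',':'] || PySem.Chars.startswith lw ['f','w',':'] then
    peelA (PySem.Chars.strip (PySem.List.slice cs (some 3) none))   -- s = s[3:].strip()
  else if PySem.Chars.startswith lw ['f','w','d',':'] then
    peelA (PySem.Chars.strip (PySem.List.slice cs (some 4) none))   -- s = s[4:].strip()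
  else cs
termination_by cs.length
decreasing_by
  · rename_i h
    rcases Bool.or_eq_true_iff.mp h with h' | h' <;>
      · have := pv_startswith_len h'
        exact pv_strip_slice_lt cs 3 (by omega) (by simpa using this)
  · rename_i h
    have := pv_startswith_len h
    exact pv_strip_slice_lt cs 4 (by omega) (by simpa using this)

def normalize_subject_py (s : Option String) : String :=
  String.mk (peelA (PySem.Chars.strip (s.getD "").toList))   -- s = (s or "").strip(); loop; return s

-- ===== PORT B =====
-- Hand port (step for step) of the compiled regex r'^(?:\s*(?:re|fw|fwd):)+\s*' with
-- re.IGNORECASE, applied via .sub("", stripped): each '+' iteration consumes \s* then one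
-- alternative re:/fw:/fwd: (tried in that order, case-insensitively); after the last token
-- the final \s* consumes the whitespace; if the first iteration finds no token the pattern
-- fails and sub returns the string unchanged. \s is PySem.Chars.isspace (exact on ASCII).

-- one alternation step '(?:re|fw|fwd):' at the current position, case-insensitive
def pvTok? : List Char → Option (List Char)
  | a :: b :: c :: rest =>
    let l := [PySem.Chars.lowerChar a, PySem.Chars.lowerChar b, PySem.Chars.lowerChar c]
    if l = ['r','e',':'] ∨ l = ['f','w',':'] then some rest
    else
      match rest with
      | d :: rest2 =>
        if l = ['f','w','d'] ∧ PySem.Chars.lowerChar d = ':' then some rest2 else none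
      | [] => none
  | _ => none

theorem pvTok?_len {cs rest : List Char} (h : pvTok? cs = some rest) :
    rest.length + 3 ≤ cs.length := by
  rcases cs with _ | ⟨a, _ | ⟨b, _ | ⟨c, _ | ⟨d, t2⟩⟩⟩⟩
  · exact absurd h (by simp [pvTok?])
  · exact absurd h (by simp [pvTok?])
  · exact absurd h (by simp [pvTok?])
  · simp only [pvTok?] at h
    split_ifs at h <;> simp_all
  · simp only [pvTok?] at h
    split_ifs at h <;> simp_all

-- the '+' loop after its first successful iteration: (\s* token)* then the trailing \s*
def pvPlus (cs : List Char) : List Char :=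
  match h : pvTok? (cs.dropWhile PySem.Chars.isspace) with
  | some rest => pvPlus rest
  | none => cs.dropWhile PySem.Chars.isspace
termination_by cs.length
decreasing_by
  have h1 := pvTok?_len h
  have h2 := List.length_dropWhile_le PySem.Chars.isspace cs
  omega

-- re.sub of the anchored pattern: the '+' must match at least one token, else no change
def pvSub (cs : List Char) : List Char :=
  match pvTok? (cs.dropWhile PySem.Chars.isspace) with
  | some rest => pvPlus rest
  | none => cs

def normalize_subject_py_alt (s : Option String) : String :=
  String.mk (pvSub (PySem.Chars.strip (s.getD "").toList))

-- ===== PRECONDITION & SPEC =====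
def Spec_normalize_subject_py (s : Option String) (out : String) : Prop := out = normalize_subject_py_alt s
instance (s : Option String) (out : String) : Decidable (Spec_normalize_subject_py s out) := by unfold Spec_normalize_subject_py; infer_instance

-- ===== CLAIM (what is proved, stated in full; the proofs are below) =====
def Claim_equal_normalize_subject_py : Prop := ∀ (s : Option String), Dom_normalize_subject_py s → Spec_normalize_subject_py s (normalize_subject_py s)

-- ===== LEMMAS AND PROOFS =====

theorem pv_slice_drop3 (cs : List Char) (h : 3 ≤ cs.length) :
    PySem.List.slice cs (some 3) none = cs.drop 3 := by
  simpa using pv_slice_drop cs 3 h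

theorem pv_slice_drop4 (cs : List Char) (h : 4 ≤ cs.length) :
    PySem.List.slice cs (some 4) none = cs.drop 4 := by
  simpa using pv_slice_drop cs 4 h

theorem pvPlus_eq_some {cs rest : List Char}
    (h : pvTok? (cs.dropWhile PySem.Chars.isspace) = some rest) : pvPlus cs = pvPlus rest := by
  rw [pvPlus]
  split <;> simp_all

theorem pvPlus_eq_none {cs : List Char}
    (h : pvTok? (cs.dropWhile PySem.Chars.isspace) = none) :
    pvPlus cs = cs.dropWhile PySem.Chars.isspace := by
  rw [pvPlus]
  split <;> simp_all

-- "no trailing whitespace" invariant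
def pvNT (cs : List Char) : Prop := ∀ c ∈ cs.reverse.head?, PySem.Chars.isspace c = false

theorem pvNT_of_suffix {t cs : List Char} (hs : t <:+ cs) (h : pvNT cs) : pvNT t := by
  intro c hc
  obtain ⟨u, rfl⟩ := hs
  apply h c
  rw [List.reverse_append]
  rcases ht : t.reverse with _ | ⟨x, tr⟩
  · rw [ht] at hc; simp at hc
  · rw [ht] at hc; simp at hc; simp [hc]

theorem pvNT_drop {cs : List Char} (k : Nat) (h : pvNT cs) : pvNT (cs.drop k) :=
  pvNT_of_suffix (List.drop_suffix k cs) h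

theorem pv_dropWhile_eq_of_head (p : Char → Bool) (l : List Char)
    (h : ∀ c ∈ l.head?, p c = false) : List.dropWhile p l = l := by
  rcases l with _ | ⟨x, t⟩
  · rfl
  · simp [h x (by simp)]

theorem pv_rstrip_of_NT {cs : List Char} (h : pvNT cs) : PySem.Chars.rstrip cs = cs := by
  simp only [PySem.Chars.rstrip]
  rw [pv_dropWhile_eq_of_head _ _ (fun c hc => h c hc), List.reverse_reverse]

-- on a string without trailing whitespace, strip() is just the left strip
theorem pv_strip_of_NT {cs : List Char} (h : pvNT cs) :
    PySem.Chars.strip cs = cs.dropWhile PySem.Chars.isspace := by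
  simp only [PySem.Chars.strip, PySem.Chars.lstrip]
  exact pv_rstrip_of_NT (pvNT_of_suffix (List.dropWhile_suffix _) h)

theorem pvNT_strip (x : List Char) : pvNT (PySem.Chars.strip x) := by
  intro c hc
  simp only [PySem.Chars.strip, PySem.Chars.rstrip, List.reverse_reverse] at hc
  have := List.head?_dropWhile_not PySem.Chars.isspace (PySem.Chars.lstrip x).reverse
  rw [hc] at this
  exact this

-- a stripped string also has no leading whitespace
theorem pv_lstrip_strip (x : List Char) :
    List.dropWhile PySem.Chars.isspace (PySem.Chars.strip x) = PySem.Chars.strip x := by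
  apply pv_dropWhile_eq_of_head
  intro c hc
  simp only [PySem.Chars.strip] at hc
  have hpre : PySem.Chars.rstrip (PySem.Chars.lstrip x) <+: PySem.Chars.lstrip x := by
    simp only [PySem.Chars.rstrip]
    rw [← List.reverse_suffix]
    simpa using List.dropWhile_suffix (l := (PySem.Chars.lstrip x).reverse) PySem.Chars.isspace
  obtain ⟨u, hu⟩ := hpre
  have hhead : (PySem.Chars.lstrip x).head? = some c := by
    rw [← hu]
    rcases hr : PySem.Chars.rstrip (PySem.Chars.lstrip x) with _ | ⟨y, t⟩
    · rw [hr] at hc; simp at hc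
    · rw [hr] at hc; simp at hc; simp [hc]
  have := List.head?_dropWhile_not PySem.Chars.isspace x
  rw [show x.dropWhile PySem.Chars.isspace = PySem.Chars.lstrip x from rfl, hhead] at this
  exact this

-- the alternation step agrees with A's lowered-startswith tests
set_option maxHeartbeats 1000000 in
theorem pvTok?_eq (cs : List Char) :
    pvTok? cs =
      if PySem.Chars.startswith (PySem.Chars.lower cs) ['r','e',':'] ||
         PySem.Chars.startswith (PySem.Chars.lower cs) ['f','w',':'] then some (cs.drop 3)
      else if PySem.Chars.startswith (PySem.Chars.lower cs) ['f','w','d',':'] then some (cs.drop 4)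
      else none := by
  rcases cs with _ | ⟨a, _ | ⟨b, _ | ⟨c, _ | ⟨d, t2⟩⟩⟩⟩ <;>
    simp only [pvTok?, PySem.Chars.startswith, PySem.Chars.lower, List.map, List.isPrefixOf] <;>
    split_ifs <;> simp_all <;> tauto

-- main loop correspondence: after a token, A re-strips while B only skips leading \s*;
-- on strings without trailing whitespace the two coincide
theorem pv_plus_eq_peel : ∀ n cs, cs.length ≤ n → pvNT cs →
    pvPlus cs = peelA (PySem.Chars.strip cs) := by
  intro n
  induction n with
  | zero =>
    intro cs hlen _
    have : cs = [] := List.eq_nil_of_length_eq_zero (by omega)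
    subst this
    have htok : pvTok? (List.dropWhile PySem.Chars.isspace ([] : List Char)) = none := by
      simp [pvTok?]
    rw [pvPlus_eq_none htok, peelA]
    simp [PySem.Chars.strip, PySem.Chars.lstrip, PySem.Chars.rstrip,
      PySem.Chars.startswith, PySem.Chars.lower]
  | succ m ih =>
    intro cs hlen hnt
    rw [pv_strip_of_NT hnt]
    have hntws : pvNT (cs.dropWhile PySem.Chars.isspace) :=
      pvNT_of_suffix (List.dropWhile_suffix _) hnt
    have hwlen := List.length_dropWhile_le PySem.Chars.isspace cs
    set ws := cs.dropWhile PySem.Chars.isspace with hws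
    by_cases h1 : (PySem.Chars.startswith (PySem.Chars.lower ws) ['r','e',':'] ||
        PySem.Chars.startswith (PySem.Chars.lower ws) ['f','w',':']) = true
    · have hlen3 : 3 ≤ ws.length := by
        rcases Bool.or_eq_true_iff.mp h1 with h | h <;>
          · have := pv_startswith_len h; simpa using this
      have hdrop : (ws.drop 3).length ≤ m := by
        have : (ws.drop 3).length = ws.length - 3 := List.length_drop
        omega
      have htok : pvTok? ws = some (ws.drop 3) := by rw [pvTok?_eq]; simp [h1]
      rw [pvPlus_eq_some (hws ▸ htok), peelA]
      simp only [h1, if_true]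
      rw [pv_slice_drop3 ws hlen3]
      exact ih (ws.drop 3) hdrop (pvNT_drop 3 hntws)
    · by_cases h2 : PySem.Chars.startswith (PySem.Chars.lower ws) ['f','w','d',':'] = true
      · have hlen4 : 4 ≤ ws.length := by have := pv_startswith_len h2; simpa using this
        have hdrop : (ws.drop 4).length ≤ m := by
          have : (ws.drop 4).length = ws.length - 4 := List.length_drop
          omega
        have htok : pvTok? ws = some (ws.drop 4) := by rw [pvTok?_eq]; simp [h1, h2]
        rw [pvPlus_eq_some (hws ▸ htok), peelA]
        simp only [h1, h2, if_true]
        rw [pv_slice_drop4 ws hlen4]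
        exact ih (ws.drop 4) hdrop (pvNT_drop 4 hntws)
      · have htok : pvTok? ws = none := by rw [pvTok?_eq]; simp [h1, h2]
        rw [pvPlus_eq_none (hws ▸ htok), peelA]
        simp only [h1, h2, Bool.false_eq_true, if_false]
        exact hws.symm

theorem pv_sub_eq_peel (x : List Char) :
    pvSub (PySem.Chars.strip x) = peelA (PySem.Chars.strip x) := by
  have hnt : pvNT (PySem.Chars.strip x) := pvNT_strip x
  set t := PySem.Chars.strip x with ht
  have hnl : List.dropWhile PySem.Chars.isspace t = t := pv_lstrip_strip x
  by_cases h1 : (PySem.Chars.startswith (PySem.Chars.lower t) ['r','e',':'] ||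
      PySem.Chars.startswith (PySem.Chars.lower t) ['f','w',':']) = true
  · have hlen3 : 3 ≤ t.length := by
      rcases Bool.or_eq_true_iff.mp h1 with h | h <;>
        · have := pv_startswith_len h; simpa using this
    have htok : pvTok? t = some (t.drop 3) := by rw [pvTok?_eq]; simp [h1]
    rw [pvSub, hnl, htok, peelA]
    simp only [h1, if_true]
    rw [pv_slice_drop3 t hlen3]
    exact pv_plus_eq_peel (t.drop 3).length (t.drop 3) le_rfl (pvNT_drop 3 hnt)
  · by_cases h2 : PySem.Chars.startswith (PySem.Chars.lower t) ['f','w','d',':'] = true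
    · have hlen4 : 4 ≤ t.length := by have := pv_startswith_len h2; simpa using this
      have htok : pvTok? t = some (t.drop 4) := by rw [pvTok?_eq]; simp [h1, h2]
      rw [pvSub, hnl, htok, peelA]
      simp only [h1, h2, if_true]
      rw [pv_slice_drop4 t hlen4]
      exact pv_plus_eq_peel (t.drop 4).length (t.drop 4) le_rfl (pvNT_drop 4 hnt)
    · have htok : pvTok? t = none := by rw [pvTok?_eq]; simp [h1, h2]
      rw [pvSub, hnl, htok, peelA]
      simp [h1, h2]

-- ===== VERDICT (by name: the statement is the Claim_ definition above) =====
theorem normalize_subject_py_spec : Claim_equal_normalize_subject_py := by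
  intro s _
  unfold Spec_normalize_subject_py normalize_subject_py normalize_subject_py_alt
  rw [pv_sub_eq_peel]
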